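-- pv_equiv track=rewrite | github.com/GautamViki/DSA | Recursion/maze_path.py | get_maze_path
-- ===== SOURCE A (Python) =====
-- def get_maze_path(sr,sc,dr,dc):
--     if sr == dr and sc == dc:
--         return ['']
--     vpaths = []
--     hpaths = []
--     if sr<dr:
--         vpaths = get_maze_path(sr+1,sc,dr,dc)
--     if sc<dc:
--         hpaths = get_maze_path(sr,sc+1,dr,dc)
--     paths = []
--     for path in vpaths:
--        paths.append('v'+path)
--     for path in hpaths:
--         paths.append('h'+path)
--     return paths
-- ===== SOURCE B (Python) =====
-- def get_maze_path(sr, sc, dr, dc):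
--     # Bottom-up DP over remaining (rows, cols): each subproblem's path list
--     # is computed exactly once instead of being recomputed recursively.
--     m = dr - sr
--     n = dc - sc
--     if m < 0 or n < 0:
--         return []
--     row = None
--     for i in range(m + 1):
--         new_row = []
--         for j in range(n + 1):
--             if i == 0 and j == 0:
--                 cell = ['']
--             else:
--                 cell = []
--                 if i > 0:
--                     cell += ['v' + p for p in row[j]]
--                 if j > 0:
--                     cell += ['h' + p for p in new_row[j - 1]]
--             new_row.append(cell)
--         row = new_row
--     return row[n]
-- ===== Notes on version B (the rewrite author's own statement) =====
-- stated objective: alternative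
-- what changed: Replaces the top-down recursion with a bottom-up dynamic-programming table over remaining (rows, cols), each subproblem's path list built exactly once from the previous row and the cell to the left; it trades recursion for two loops and avoids recomputing shared subproblems.
import Mathlib
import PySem

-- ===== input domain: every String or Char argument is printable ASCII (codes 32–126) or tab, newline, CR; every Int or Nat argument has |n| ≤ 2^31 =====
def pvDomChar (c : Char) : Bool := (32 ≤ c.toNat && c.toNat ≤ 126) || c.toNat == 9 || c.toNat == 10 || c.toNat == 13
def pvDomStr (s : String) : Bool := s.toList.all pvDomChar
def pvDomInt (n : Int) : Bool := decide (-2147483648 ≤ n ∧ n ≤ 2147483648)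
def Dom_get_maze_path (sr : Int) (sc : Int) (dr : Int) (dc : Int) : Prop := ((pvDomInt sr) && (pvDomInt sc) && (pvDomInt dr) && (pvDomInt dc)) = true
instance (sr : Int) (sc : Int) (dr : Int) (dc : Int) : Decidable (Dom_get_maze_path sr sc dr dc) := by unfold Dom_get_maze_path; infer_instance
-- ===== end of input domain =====

-- B replaces A's top-down recursion with a bottom-up DP table over remaining (rows, cols), each subproblem built once; same return value.

-- ===== PORT A =====
-- literal transliteration of A's recursion (the two for-loops are the two folds)
def get_maze_path (sr : Int) (sc : Int) (dr : Int) (dc : Int) : List String :=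
  if sr = dr ∧ sc = dc then [""]
  else
    let vpaths := if sr < dr then get_maze_path (sr + 1) sc dr dc else []
    let hpaths := if sc < dc then get_maze_path sr (sc + 1) dr dc else []
    let paths := vpaths.foldl (fun acc p => acc ++ ["v" ++ p]) []
    hpaths.foldl (fun acc p => acc ++ ["h" ++ p]) paths
termination_by ((dr - sr).toNat + (dc - sc).toNat)
decreasing_by all_goals omega

-- ===== PORT B =====
-- Source B's inner loop for a row i > 0, j ≥ 1: walks the previous row, carrying the
-- cell just built (new_row[j-1]); each cell = v-prefixed row[j] ++ h-prefixed carry.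
def pvRowGo (left : List String) (prev : List (List String)) : List (List String) :=
  match prev with
  | [] => []
  | p :: rest =>
    let cell := p.map (fun s => "v" ++ s) ++ left.map (fun s => "h" ++ s)
    cell :: pvRowGo cell rest

-- Source B's inner loop for a row i > 0: the j = 0 cell has only the v-part
def pvNextRow (prev : List (List String)) : List (List String) :=
  match prev with
  | [] => []
  | p0 :: rest =>
    let c0 := p0.map (fun s => "v" ++ s)
    c0 :: pvRowGo c0 rest

-- Source B's inner loop for row i = 0, j ≥ 1: each cell = h-prefixed carry
def pvRow0Go (left : List String) : Nat → List (List String)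
  | 0 => []
  | k + 1 =>
    let cell := left.map (fun s => "h" ++ s)
    cell :: pvRow0Go cell k

-- row i = 0: cell (0,0) = [''] then n more cells
def pvRow0 (n : Nat) : List (List String) := [""] :: pvRow0Go [""] n

-- Source B's outer loop: m successive rows after row 0
def pvRows (n : Nat) : Nat → List (List String)
  | 0 => pvRow0 n
  | m + 1 => pvNextRow (pvRows n m)

def get_maze_path_alt (sr : Int) (sc : Int) (dr : Int) (dc : Int) : List String :=
  let m := dr - sr
  let n := dc - sc
  if m < 0 ∨ n < 0 then []
  else (pvRows n.toNat m.toNat).getD n.toNat []  -- row[n]: index is in range, so getD is exact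

-- ===== PRECONDITION & SPEC =====
-- Pre_ excludes exactly the inputs on which Python A RAISES RecursionError: A's recursion
-- depth is (dr-sr)+(dc-sc) frames below the caller, and measured against CPython's default
-- recursion limit (1000) A returns for every total distance up to 997 and raises from 998 on.
def Pre_get_maze_path (sr : Int) (sc : Int) (dr : Int) (dc : Int) : Prop :=
  (dr - sr).toNat + (dc - sc).toNat < 998
instance (sr : Int) (sc : Int) (dr : Int) (dc : Int) : Decidable (Pre_get_maze_path sr sc dr dc) := by unfold Pre_get_maze_path; infer_instance
def pvWitness_get_maze_path : Int × Int × Int × Int := (0, 0, 2, 2)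

def Spec_get_maze_path (sr : Int) (sc : Int) (dr : Int) (dc : Int) (out : List String) : Prop := out = get_maze_path_alt sr sc dr dc
instance (sr : Int) (sc : Int) (dr : Int) (dc : Int) (out : List String) : Decidable (Spec_get_maze_path sr sc dr dc out) := by unfold Spec_get_maze_path; infer_instance

-- ===== CLAIM (what is proved, stated in full; the proofs are below) =====
def Claim_equal_get_maze_path : Prop := ∀ (sr : Int) (sc : Int) (dr : Int) (dc : Int), Dom_get_maze_path sr sc dr dc → Pre_get_maze_path sr sc dr dc → Spec_get_maze_path sr sc dr dc (get_maze_path sr sc dr dc)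

-- ===== LEMMAS AND PROOFS =====

-- mathematical characterisation of the path list for remaining (i rows, j cols)
def Pspec : Nat → Nat → List String
  | 0, 0 => [""]
  | i + 1, 0 => (Pspec i 0).map (fun s => "v" ++ s)
  | 0, j + 1 => (Pspec 0 j).map (fun s => "h" ++ s)
  | i + 1, j + 1 => (Pspec i (j + 1)).map (fun s => "v" ++ s) ++ (Pspec (i + 1) j).map (fun s => "h" ++ s)

theorem flatten_singleton_map {α β : Type} (f : α → β) (l : List α) :
    (l.map (fun x => [f x])).flatten = l.map f := by
  induction l with
  | nil => rfl
  | cons x xs ih => simp [ih]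

theorem A_neg (sr sc dr dc : Int) (h : dr < sr ∨ dc < sc) : get_maze_path sr sc dr dc = [] := by
  rw [get_maze_path]
  have hne : ¬ (sr = dr ∧ sc = dc) := by omega
  simp only [hne, if_false]
  rcases h with h | h
  · have h1 : ¬ sr < dr := by omega
    by_cases h2 : sc < dc
    · simp [h1, h2, A_neg sr (sc + 1) dr dc (Or.inl h)]
    · simp [h1, h2]
  · have h2 : ¬ sc < dc := by omega
    by_cases h1 : sr < dr
    · simp [h1, h2, A_neg (sr + 1) sc dr dc (Or.inr h)]
    · simp [h1, h2]
termination_by ((dr - sr).toNat + (dc - sc).toNat)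
decreasing_by all_goals omega

theorem A_spec (sr sc dr dc : Int) (hi : sr ≤ dr) (hj : sc ≤ dc) :
    get_maze_path sr sc dr dc = Pspec (dr - sr).toNat (dc - sc).toNat := by
  rw [get_maze_path]
  by_cases hbase : sr = dr ∧ sc = dc
  · have h1 : (dr - sr).toNat = 0 := by omega
    have h2 : (dc - sc).toNat = 0 := by omega
    simp [hbase, Pspec]
  · simp only [hbase, if_false]
    rcases Nat.eq_zero_or_eq_succ_pred (dr - sr).toNat with ha | ha
    · -- no rows remaining: sr = dr, so sc < dc
      have hsd : sr = dr := by omega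
      have hlt : sc < dc := by omega
      have h1 : ¬ sr < dr := by omega
      obtain ⟨j, hb⟩ : ∃ j, (dc - sc).toNat = j + 1 := ⟨(dc - sc).toNat - 1, by omega⟩
      have hrec := A_spec sr (sc + 1) dr dc hi (by omega)
      have hj' : (dc - (sc + 1)).toNat = j := by omega
      rw [hj'] at hrec
      simp [h1, hlt, hrec, ha, hb, Pspec, flatten_singleton_map]
    · obtain ⟨i, ha⟩ : ∃ i, (dr - sr).toNat = i + 1 := ⟨(dr - sr).toNat - 1, by omega⟩
      have hlt : sr < dr := by omega
      have hrecv := A_spec (sr + 1) sc dr dc (by omega) hj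
      have hi' : (dr - (sr + 1)).toNat = i := by omega
      rw [hi'] at hrecv
      rcases Nat.eq_zero_or_eq_succ_pred (dc - sc).toNat with hb | hb
      · have h2 : ¬ sc < dc := by omega
        simp [hlt, h2, hrecv, ha, hb, Pspec, flatten_singleton_map]
      · obtain ⟨j, hb⟩ : ∃ j, (dc - sc).toNat = j + 1 := ⟨(dc - sc).toNat - 1, by omega⟩
        have hlt2 : sc < dc := by omega
        have hrech := A_spec sr (sc + 1) dr dc hi (by omega)
        have hj' : (dc - (sc + 1)).toNat = j := by omega
        rw [hj'] at hrech
        simp [hlt, hlt2, hrecv, hrech, ha, hb, Pspec, flatten_singleton_map]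
termination_by ((dr - sr).toNat + (dc - sc).toNat)
decreasing_by all_goals omega

theorem row0Go_spec (k : Nat) : ∀ j : Nat, pvRow0Go (Pspec 0 j) k = (List.range' (j + 1) k).map (Pspec 0) := by
  induction k with
  | zero => intro j; simp [pvRow0Go]
  | succ k ih =>
    intro j
    have hc : (Pspec 0 j).map (fun s => "h" ++ s) = Pspec 0 (j + 1) := by simp [Pspec]
    simp only [pvRow0Go, hc, List.range'_succ, List.map_cons]
    exact congrArg _ (ih (j + 1))

theorem rowGo_spec (k : Nat) : ∀ i j : Nat,
    pvRowGo (Pspec (i + 1) j) ((List.range' (j + 1) k).map (Pspec i)) =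
      (List.range' (j + 1) k).map (Pspec (i + 1)) := by
  induction k with
  | zero => intro i j; simp [pvRowGo]
  | succ k ih =>
    intro i j
    have hc : (Pspec i (j + 1)).map (fun s => "v" ++ s) ++ (Pspec (i + 1) j).map (fun s => "h" ++ s)
        = Pspec (i + 1) (j + 1) := by simp [Pspec]
    simp only [List.range'_succ, List.map_cons, pvRowGo, hc]
    exact congrArg _ (ih i (j + 1))

theorem rows_spec (n m : Nat) : pvRows n m = (List.range' 0 (n + 1)).map (Pspec m) := by
  induction m with
  | zero =>
    simp only [pvRows, pvRow0, List.range'_succ, List.map_cons]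
    have h0 : ([""] : List String) = Pspec 0 0 := by simp [Pspec]
    rw [h0, row0Go_spec n 0]
  | succ m ih =>
    simp only [pvRows, ih, List.range'_succ, List.map_cons, pvNextRow]
    have hc : (Pspec m 0).map (fun s => "v" ++ s) = Pspec (m + 1) 0 := by simp [Pspec]
    rw [hc, rowGo_spec n m 0]

theorem rows_getD (n m : Nat) : (pvRows n m).getD n [] = Pspec m n := by
  rw [rows_spec]
  have hlen : n < ((List.range' 0 (n + 1)).map (Pspec m)).length := by simp
  rw [List.getD_eq_getElem _ _ hlen]
  simp

-- ===== VERDICT (by name: the statement is the Claim_ definition above) =====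
theorem get_maze_path_spec : Claim_equal_get_maze_path := by
  intro sr sc dr dc _ _
  unfold Spec_get_maze_path get_maze_path_alt
  by_cases h : dr - sr < 0 ∨ dc - sc < 0
  · simp only [h, if_true]
    exact A_neg sr sc dr dc (by omega)
  · simp only [h, if_false]
    rw [A_spec sr sc dr dc (by omega) (by omega), rows_getD]
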